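-- pv_equiv track=rewrite | github.com/915dbfl/youlAlgorithm | Programmers/level2/binary.py | solution
-- ===== SOURCE A (Python) =====
-- def solution(s):
--     rmv, cnt = 0, 0
--     while s != "1":
--         cnt += 1
--         rmv += s.count("0")
--         s = s.replace("0", "")
--         s = bin(len(s))[2:]
--     return [cnt, rmv]
-- ===== SOURCE B (Python) =====
-- def solution(s):
--     if s == "1":
--         return [0, 0]
--
--     def orbit(n):
--         # successive survivor-counts, down to the fixpoint 1
--         return [n] if n == 1 else [n] + orbit(bin(n).count("1"))
--
--     zeros = s.count("0")
--     chain = orbit(len(s) - zeros)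
--     return [len(chain),
--             zeros + sum(v.bit_length() - bin(v).count("1") for v in chain[:-1])]
-- ===== Notes on version B (the rewrite author's own statement) =====
-- stated objective: alternative
-- what changed: B materializes the orbit of survivor-counts as an explicit list built by structural recursion and then derives both answers by separate aggregations over that list (its length, and a sum of per-state removed-zero counts), instead of A's while loop that mutates a string and carries two running accumulators.
-- outside the precondition, e.g. on solution('0'): A does not finish within the time limit, B raises RecursionError
import Mathlib
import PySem

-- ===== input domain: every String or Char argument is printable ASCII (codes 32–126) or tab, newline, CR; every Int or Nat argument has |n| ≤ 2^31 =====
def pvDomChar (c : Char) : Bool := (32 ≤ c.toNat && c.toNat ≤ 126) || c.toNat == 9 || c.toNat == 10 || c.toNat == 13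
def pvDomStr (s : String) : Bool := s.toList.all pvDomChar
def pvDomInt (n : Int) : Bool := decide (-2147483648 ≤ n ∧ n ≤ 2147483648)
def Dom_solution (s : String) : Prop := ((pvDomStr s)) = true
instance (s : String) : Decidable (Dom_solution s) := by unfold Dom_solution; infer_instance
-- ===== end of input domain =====

-- B builds the list of successive survivor-counts by recursion and aggregates over it,
-- instead of A's accumulator while-loop over a mutating string; equivalence is proved on
-- Pre_solution (A diverges on all-'0' strings, which Pre_ excludes).

-- ===== PORT A =====
-- Python's bin(n)[2:], as the big-endian list of binary digit characters.
def binChars (n : Nat) : List Char :=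
  if n = 0 then ['0'] else binRec n
where
  binRec (n : Nat) : List Char :=
    if h : n = 0 then []
    else binRec (n / 2) ++ [if n % 2 = 1 then '1' else '0']
  decreasing_by exact Nat.div_lt_self (Nat.pos_of_ne_zero h) (by omega)

-- the while loop of A, with fuel (the loop diverges on the all-'0' states Pre_ excludes)
def solutionLoop (fuel : Nat) (cs : List Char) (cnt rmv : Int) : List Int :=
  match fuel with
  | 0 => [cnt, rmv]
  | fuel + 1 =>
    if cs = ['1'] then [cnt, rmv]
    else solutionLoop fuel (binChars ((cs.filter (fun c => c ≠ '0')).length))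
           (cnt + 1) (rmv + (cs.count '0' : Int))

def solution (s : String) : List Int :=
  solutionLoop (s.toList.length + 2) s.toList 0 0

-- ===== PORT B =====
-- Python int.bit_length and bin(n).count("1") (popcount)
def bitLen (n : Nat) : Nat :=
  if h : n = 0 then 0 else bitLen (n / 2) + 1
  decreasing_by exact Nat.div_lt_self (Nat.pos_of_ne_zero h) (by omega)

def popCount (n : Nat) : Nat :=
  if h : n = 0 then 0 else popCount (n / 2) + n % 2
  decreasing_by exact Nat.div_lt_self (Nat.pos_of_ne_zero h) (by omega)

-- B's recursive orbit of survivor-counts, with fuel (diverges for n = 0, excluded by Pre_)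
def orbit (fuel : Nat) (n : Nat) : List Nat :=
  match fuel with
  | 0 => [n]
  | fuel + 1 => if n = 1 then [n] else n :: orbit fuel (popCount n)

def solution_alt (s : String) : List Int :=
  if s.toList = ['1'] then [0, 0]
  else
    let zeros := s.toList.count '0'
    let chain := orbit (s.toList.length + 1) (s.toList.length - zeros)
    [(chain.length : Int),
     (zeros : Int) + ((chain.dropLast.map (fun v => bitLen v - popCount v)).sum : Int)]

-- ===== PRECONDITION & SPEC =====
-- A (and B) loops forever when every character of s is '0' (including s = ""): excluded.
def Pre_solution (s : String) : Prop := s.toList.any (fun c => c ≠ '0') = true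
instance (s : String) : Decidable (Pre_solution s) := by unfold Pre_solution; infer_instance
def pvWitness_solution : String := "110"
def Spec_solution (s : String) (out : List Int) : Prop := out = solution_alt s
instance (s : String) (out : List Int) : Decidable (Spec_solution s out) := by unfold Spec_solution; infer_instance

-- ===== CLAIM (what is proved, stated in full; the proofs are below) =====
def Claim_equal_solution : Prop := ∀ (s : String), Dom_solution s → Pre_solution s → Spec_solution s (solution s)

-- ===== LEMMAS AND PROOFS =====

theorem binRec_ne_nil {n : Nat} (h : n ≠ 0) : binChars.binRec n ≠ [] := by
  rw [binChars.binRec]; simp [h]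

theorem binChars_eq_binRec {n : Nat} (h : n ≠ 0) : binChars n = binChars.binRec n := by
  rw [binChars]; simp [h]

theorem binRec_count0 (n : Nat) : (binChars.binRec n).count '0' = bitLen n - popCount n ∧
    (binChars.binRec n).length = bitLen n ∧ popCount n ≤ bitLen n := by
  induction n using Nat.strong_induction_on with
  | _ n ih =>
    rw [binChars.binRec, popCount, bitLen]
    by_cases h : n = 0
    · simp [h]
    · obtain ⟨c0, cl, cle⟩ := ih (n / 2) (Nat.div_lt_self (Nat.pos_of_ne_zero h) (by omega))
      simp only [h, dite_false, List.count_append, List.length_append]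
      rcases Nat.mod_two_eq_zero_or_one n with h2 | h2 <;>
        simp [h2, List.count_nil] <;> omega

theorem binRec_filter_len (n : Nat) :
    ((binChars.binRec n).filter (fun c => c ≠ '0')).length = popCount n := by
  induction n using Nat.strong_induction_on with
  | _ n ih =>
    rw [binChars.binRec, popCount]
    by_cases h : n = 0
    · simp [h]
    · simp only [h, dite_false, List.filter_append, List.length_append]
      rw [ih (n / 2) (Nat.div_lt_self (Nat.pos_of_ne_zero h) (by omega))]
      rcases Nat.mod_two_eq_zero_or_one n with h2 | h2 <;> simp [h2, List.filter]

theorem binRec_eq_one {n : Nat} (h : n ≠ 0) : binChars.binRec n = ['1'] ↔ n = 1 := by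
  constructor
  · intro he
    rw [binChars.binRec] at he
    simp only [h, dite_false] at he
    by_cases h2 : n / 2 = 0
    · rcases Nat.mod_two_eq_zero_or_one n with hm | hm <;> simp [hm] at he <;> omega
    · exfalso
      have := binRec_ne_nil h2
      rcases hx : binChars.binRec (n / 2) with _ | ⟨a, t⟩
      · exact this hx
      · rw [hx] at he; simp at he
  · intro he; subst he
    have h0 : binChars.binRec 0 = [] := by simp [binChars.binRec]
    rw [binChars.binRec, h0]
    norm_num

theorem popCount_pos {n : Nat} (h : n ≠ 0) : 1 ≤ popCount n := by
  induction n using Nat.strong_induction_on with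
  | _ n ih =>
    rw [popCount]
    simp only [h, dite_false]
    by_cases h2 : n / 2 = 0
    · omega
    · have := ih (n / 2) (Nat.div_lt_self (Nat.pos_of_ne_zero h) (by omega)) h2
      omega

theorem bitLen_le (n : Nat) : bitLen n ≤ n := by
  induction n using Nat.strong_induction_on with
  | _ n ih =>
    rw [bitLen]
    by_cases h : n = 0
    · simp [h]
    · have := ih (n / 2) (Nat.div_lt_self (Nat.pos_of_ne_zero h) (by omega))
      simp only [h, dite_false]; omega

theorem popCount_lt {n : Nat} (h : 2 ≤ n) : popCount n < n := by
  rw [popCount]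
  simp only [show n ≠ 0 by omega, dite_false]
  have h1 := (binRec_count0 (n / 2)).2.2
  have h2 := bitLen_le (n / 2)
  omega

theorem orbit_ne_nil (g n : Nat) : orbit g n ≠ [] := by
  cases g with
  | zero => simp [orbit]
  | succ g => rw [orbit]; split <;> simp

-- A's loop, started at state bin(n), computes what B's length/sum aggregation of orbit n computes
theorem loop_orbit (n : Nat) : ∀ (f g : Nat) (cnt rmv : Int), 1 ≤ n → n ≤ f → n ≤ g →
    solutionLoop f (binChars n) cnt rmv =
      [cnt + ((orbit g n).length : Int) - 1,
       rmv + (((orbit g n).dropLast.map (fun v => bitLen v - popCount v)).sum : Int)] := by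
  induction n using Nat.strong_induction_on with
  | _ n ih =>
    intro f g cnt rmv h1 hf hg
    obtain ⟨f, rfl⟩ : ∃ f', f = f' + 1 := ⟨f - 1, by omega⟩
    obtain ⟨g, rfl⟩ : ∃ g', g = g' + 1 := ⟨g - 1, by omega⟩
    rw [solutionLoop, orbit, binChars_eq_binRec (by omega)]
    by_cases he : n = 1
    · subst he
      rw [(binRec_eq_one (by omega)).2 rfl]
      simp
    · rw [if_neg (fun hc => he ((binRec_eq_one (by omega)).1 hc)), if_neg he]
      rw [binRec_filter_len, (binRec_count0 n).1]
      have hlt := popCount_lt (show 2 ≤ n by omega)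
      have hpos := popCount_pos (show n ≠ 0 by omega)
      rw [ih (popCount n) hlt f g (cnt + 1) (rmv + ((bitLen n - popCount n : Nat) : Int))
        hpos (by omega) (by omega)]
      have hnn := orbit_ne_nil g (popCount n)
      rw [List.dropLast_cons_of_ne_nil hnn]
      simp only [List.length_cons, List.map_cons, List.sum_cons, List.cons.injEq, and_true]
      push_cast
      exact ⟨by ring, by ring⟩

theorem count_filter_len (cs : List Char) :
    (cs.filter (fun c => c ≠ '0')).length = cs.length - cs.count '0' ∧ cs.count '0' ≤ cs.length := by
  induction cs with
  | nil => simp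
  | cons a t ih =>
    obtain ⟨ih1, ih2⟩ := ih
    by_cases h : a = '0' <;> simp [h] at * <;> omega

theorem filter_len_pos {cs : List Char} (h : cs.any (fun c => c ≠ '0') = true) :
    1 ≤ (cs.filter (fun c => c ≠ '0')).length := by
  rw [List.any_eq_true] at h
  obtain ⟨c, hc, hne⟩ := h
  have : c ∈ cs.filter (fun c => c ≠ '0') := List.mem_filter.2 ⟨hc, hne⟩
  exact List.length_pos_of_mem this

-- ===== VERDICT (by name: the statement is the Claim_ definition above) =====
theorem solution_spec : Claim_equal_solution := by
  intro s _ hpre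
  unfold Spec_solution solution solution_alt Pre_solution at *
  set cs := s.toList with hcs
  by_cases h1 : cs = ['1']
  · rw [solutionLoop]; simp [h1]
  · rw [solutionLoop, if_neg h1]
    simp only [h1, if_false]
    obtain ⟨hflt, hle⟩ := count_filter_len cs
    have hpos := filter_len_pos hpre
    have key := loop_orbit ((cs.filter (fun c => c ≠ '0')).length) (cs.length + 1)
      (cs.length + 1) (0 + 1) (0 + (cs.count '0' : Int)) hpos (by omega) (by omega)
    simp only [ne_eq, decide_not] at hflt key ⊢
    rw [hflt] at key ⊢
    rw [key]
    simp only [List.cons.injEq, and_true]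
    exact ⟨by ring, by ring⟩
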